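-- pv_equiv track=rewrite | github.com/ethan9carpenter/Finance-Project | buildData/buildPanel.py | _removeCompleted
-- ===== SOURCE A (Python) =====
-- def _removeCompleted(results, tickers, overwrite):
--     numComplete = 0
--     if not overwrite:
--         for tick in results:
--             if tick in tickers:
--                 numComplete += 1
--                 tickers.remove(tick)
--     return numComplete
-- ===== SOURCE B (Python) =====
-- def _removeCompleted(results, tickers, overwrite):
--     # Counter-based: numComplete = sum over distinct values of min(count in results, count in tickers);
--     # survivors rebuilt in one pass and written back in place (same mutation of `tickers` as A).
--     if overwrite:
--         return 0
--     need = {}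
--     for t in results:
--         need[t] = need.get(t, 0) + 1
--     have = {}
--     for t in tickers:
--         have[t] = have.get(t, 0) + 1
--     numComplete = sum(min(c, have.get(v, 0)) for v, c in need.items())
--     drop = {v: min(c, have.get(v, 0)) for v, c in need.items()}
--     survivors = []
--     for t in tickers:
--         if drop.get(t, 0) > 0:
--             drop[t] -= 1
--         else:
--             survivors.append(t)
--     tickers[:] = survivors
--     return numComplete
-- ===== Notes on version B (the rewrite author's own statement) =====
-- stated objective: alternative
-- what changed: Replaces A's per-result membership-test-and-remove loop over the tickers list with two counting dictionaries whose per-value min counts are summed, plus a single survivor-rebuild pass written back in place.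
import Mathlib
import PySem

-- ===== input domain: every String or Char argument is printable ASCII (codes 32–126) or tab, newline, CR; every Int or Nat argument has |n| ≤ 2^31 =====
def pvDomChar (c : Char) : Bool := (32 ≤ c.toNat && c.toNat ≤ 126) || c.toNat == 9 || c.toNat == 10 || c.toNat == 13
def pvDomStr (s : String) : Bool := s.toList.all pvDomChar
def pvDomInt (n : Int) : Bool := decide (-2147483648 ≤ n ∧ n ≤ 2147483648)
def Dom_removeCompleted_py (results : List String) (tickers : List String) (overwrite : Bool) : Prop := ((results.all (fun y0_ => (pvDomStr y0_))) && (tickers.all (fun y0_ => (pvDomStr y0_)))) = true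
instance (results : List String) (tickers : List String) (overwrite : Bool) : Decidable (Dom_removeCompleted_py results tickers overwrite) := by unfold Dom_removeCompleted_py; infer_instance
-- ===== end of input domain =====

-- B replaces A's quadratic remove-loop by counting dictionaries (objective: alternative, not measured faster).
-- Both A and B mutate `tickers` in place in Python (identically); the equivalence proved here is about the RETURN value only.

-- ===== PORT A =====
-- loop state: (current tickers list, numComplete); `tick in tickers` / `tickers.remove(tick)`
-- are `∈` / `List.erase` (remove of a present element = erase of first match).
def removeCompleted_py (results : List String) (tickers : List String) (overwrite : Bool) : Int :=
  if !overwrite then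
    (results.foldl
      (fun (st : List String × Int) tick =>
        if tick ∈ st.1 then (st.1.erase tick, st.2 + 1) else st)
      (tickers, (0 : Int))).2
  else 0

-- ===== PORT B =====
-- counting dicts `need`/`have`, then numComplete = sum of min(c, have.get(v, 0)) over need.items();
-- the survivor rebuild in Source B only mutates `tickers` and does not affect the return value.
def removeCompleted_py_alt (results : List String) (tickers : List String) (overwrite : Bool) : Int :=
  if overwrite then 0
  else
    let need := results.foldl (fun d t => d.insert t (d.getD t 0 + 1)) (PySem.Dict.empty : PySem.Dict String Int)
    let haveC := tickers.foldl (fun d t => d.insert t (d.getD t 0 + 1)) (PySem.Dict.empty : PySem.Dict String Int)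
    need.items.foldl (fun acc p => acc + min p.2 (haveC.getD p.1 0)) 0

-- ===== PRECONDITION & SPEC =====
def Spec_removeCompleted_py (results : List String) (tickers : List String) (overwrite : Bool) (out : Int) : Prop := out = removeCompleted_py_alt results tickers overwrite
instance (results : List String) (tickers : List String) (overwrite : Bool) (out : Int) : Decidable (Spec_removeCompleted_py results tickers overwrite out) := by unfold Spec_removeCompleted_py; infer_instance

-- ===== CLAIM (what is proved, stated in full; the proofs are below) =====
def Claim_equal_removeCompleted_py : Prop := ∀ (results : List String) (tickers : List String) (overwrite : Bool), Dom_removeCompleted_py results tickers overwrite → Spec_removeCompleted_py results tickers overwrite (removeCompleted_py results tickers overwrite)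

-- ===== LEMMAS AND PROOFS =====

-- A's loop counts the multiset intersection.
theorem loopA_card (xs : List String) : ∀ (ts : List String) (c : Int),
    (xs.foldl
      (fun (st : List String × Int) tick =>
        if tick ∈ st.1 then (st.1.erase tick, st.2 + 1) else st)
      (ts, c)).2
      = c + ((Multiset.card ((↑xs : Multiset String) ∩ (↑ts : Multiset String)) : Nat) : Int) := by
  induction xs with
  | nil => intro ts c; simp
  | cons x xs ih =>
    intro ts c
    by_cases h : x ∈ ts
    · simp only [List.foldl_cons, if_pos h, ih]
      rw [show ((↑(x :: xs) : Multiset String)) = x ::ₘ (↑xs : Multiset String) from rfl,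
          Multiset.cons_inter_of_pos _ (by simpa using h),
          show ((↑(ts.erase x) : Multiset String)) = (↑ts : Multiset String).erase x from
            Eq.symm (Multiset.coe_erase ts x)]
      simp only [Multiset.card_cons]
      push_cast; ring
    · simp only [List.foldl_cons, if_neg h, ih]
      rw [show ((↑(x :: xs) : Multiset String)) = x ::ₘ (↑xs : Multiset String) from rfl,
          Multiset.cons_inter_of_neg _ (by simpa using h)]

-- the sum of min-counts over the distinct elements of xs is the multiset-intersection card
theorem sum_min_card (xs ts : List String) :
    (∑ v ∈ xs.toFinset, min (xs.count v) (ts.count v))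
      = Multiset.card ((↑xs : Multiset String) ∩ (↑ts : Multiset String)) := by
  rw [← Multiset.toFinset_sum_count_eq]
  rw [Finset.sum_subset (s₁ := ((↑xs : Multiset String) ∩ (↑ts : Multiset String)).toFinset)]
  · apply Finset.sum_congr rfl
    intro v _
    rw [Multiset.count_inter]
    simp [Multiset.coe_count]
  · intro v hv
    simp only [Multiset.mem_toFinset, Multiset.mem_inter] at hv
    simpa using hv.1
  · intro v _ hv
    simp only [Multiset.mem_toFinset, Multiset.mem_inter, not_and] at hv
    rw [Multiset.count_inter]
    simp only [Multiset.coe_count]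
    by_cases hx : v ∈ xs
    · have := hv (by simpa using hx)
      simp [List.count_eq_zero.mpr (by simpa using this)]
    · simp [List.count_eq_zero.mpr hx]

-- Set.ofList as a Finset is the list's toFinset
theorem ofList_toFinset (xs : List String) : (PySem.Set.ofList xs).toFinset = xs.toFinset := by
  apply Finset.ext
  intro v
  simp [List.mem_toFinset, PySem.Set.mem_ofList]

-- B computes the same multiset-intersection card
theorem altB_card (xs ts : List String) :
    removeCompleted_py_alt xs ts false
      = ((Multiset.card ((↑xs : Multiset String) ∩ (↑ts : Multiset String)) : Nat) : Int) := by
  unfold removeCompleted_py_alt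
  simp only [if_neg (Bool.false_ne_true)]
  rw [PySem.Dict.foldl_insert_getD_add_one_eq_counter, PySem.Dict.foldl_insert_getD_add_one_eq_counter,
      PySem.Dict.items_counter, PySem.List.foldl_add]
  simp only [List.map_map, Function.comp_def, PySem.Dict.getD_counter, zero_add]
  have : ∀ v : String, min ((xs.count v : Int)) ((ts.count v : Int))
      = ((min (xs.count v) (ts.count v) : Nat) : Int) := by
    intro v; rw [Nat.cast_min]
  rw [List.map_congr_left (fun v _ => this v)]
  rw [← List.sum_toFinset _ (PySem.Set.nodup_ofList xs), ofList_toFinset]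
  rw [← Nat.cast_sum, sum_min_card]

-- ===== VERDICT (by name: the statement is the Claim_ definition above) =====
theorem removeCompleted_py_spec : Claim_equal_removeCompleted_py := by
  intro results tickers overwrite _
  unfold Spec_removeCompleted_py
  cases overwrite with
  | true => rfl
  | false =>
    unfold removeCompleted_py
    simp only [Bool.not_false, if_true]
    rw [loopA_card, altB_card, zero_add]
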